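-- pv_equiv track=rewrite | github.com/hanwjdgh/KaKao | Stack&Queue/5.py | solution
-- ===== SOURCE A (Python) =====
-- def solution(arrangement):
--     answer = 0
--     leng = len(arrangement)
--
--     stack = []
--     temp = ''
--     for i in range(leng):
--         if arrangement[i] == '(':
--             stack.append(arrangement[i])
--             temp='('
--         else:
--             stack.pop()
--             if temp == '(':
--                 answer += len(stack)
--             else:
--                 answer += 1
--             temp=')'
--     return answer
-- ===== SOURCE B (Python) =====
-- def solution(arrangement):
--     # Two-stage: tokenize first — an opening bracket immediately followed by any non-opening
--     # character is a laser (marked None); every other character stands for itself (an opener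
--     # opens, anything else ends a bar).  Then one stateless counting pass over the tokens.
--     tokens = []
--     i = 0
--     n = len(arrangement)
--     while i < n:
--         if arrangement[i] == '(' and i + 1 < n and arrangement[i + 1] != '(':
--             tokens.append(None)
--             i += 2
--         else:
--             tokens.append(arrangement[i])
--             i += 1
--     stack = []
--     answer = 0
--     for t in tokens:
--         if t == '(':
--             stack.append(t)
--         elif t is None:
--             answer += len(stack)
--         else:
--             stack.pop()
--             answer += 1
--     return answer
-- ===== Notes on version B (the rewrite author's own statement) =====
-- stated objective: simpler
-- what changed: Replaces A's previous-character flag with a tokenizing pre-pass that turns every laser (an opening bracket immediately followed by a non-opening character) into an explicit None token, followed by a single stateless counting pass: push on an opener, add len(stack) on a laser token, pop and add 1 on a bar end.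
import Mathlib
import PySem

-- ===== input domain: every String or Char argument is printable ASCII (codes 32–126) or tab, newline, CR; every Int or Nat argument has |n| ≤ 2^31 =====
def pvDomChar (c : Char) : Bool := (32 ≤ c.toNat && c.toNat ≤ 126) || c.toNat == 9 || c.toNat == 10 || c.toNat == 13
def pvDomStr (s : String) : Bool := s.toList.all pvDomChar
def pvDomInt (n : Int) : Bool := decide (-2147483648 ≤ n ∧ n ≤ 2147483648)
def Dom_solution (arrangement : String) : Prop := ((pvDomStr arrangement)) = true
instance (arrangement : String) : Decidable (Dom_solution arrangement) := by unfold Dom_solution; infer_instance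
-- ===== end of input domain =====

-- B replaces A's previous-character flag with a tokenizing pre-pass that makes every laser an
-- explicit token, followed by one stateless counting pass (objective: simpler).

-- ===== PORT A =====
-- for i in range(leng): dispatch on arrangement[i]; the stack holds the pushed opening brackets
-- (Python list with append/pop at the end = Lean list with cons/tail at the head; only its
-- length and pop are ever used).  stack.pop() on an empty stack raises IndexError in Python;
-- Pre_solution excludes those inputs, so `List.tail` is only reached on nonempty stacks.
def solutionStep (st : Int × List Char × String) (c : Char) : Int × List Char × String :=
  let answer := st.1
  let stack := st.2.1
  let temp := st.2.2
  if c = '(' then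
    (answer, c :: stack, "(")
  else
    let stack' := stack.tail
    let answer' := if temp = "(" then answer + (stack'.length : Int) else answer + 1
    (answer', stack', ")")

def solution (arrangement : String) : Int :=
  (arrangement.toList.foldl solutionStep (0, [], "")).1

-- ===== PORT B =====
-- pass 1 (the while loop over the index): an opening bracket immediately followed by any
-- non-opening character is a laser, marked by the token None; every other character stands for itself.
-- The index-advancing while loop is ported as the structurally identical recursion on the
-- character list ('i += 2' = dropping two characters, 'i += 1' = dropping one).
def solutionAltTok : List Char → List (Option Char)
  | '(' :: c :: t => if c ≠ '(' then none :: solutionAltTok t else some '(' :: solutionAltTok (c :: t)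
  | c :: t => some c :: solutionAltTok t
  | [] => []

-- pass 2 (the for loop over tokens): push on an opener, add len(stack) on a laser token,
-- pop and add 1 on anything else (a bar end).
def solutionAltStep (st : List Char × Int) (tk : Option Char) : List Char × Int :=
  let stack := st.1
  let answer := st.2
  if tk = some '(' then ('(' :: stack, answer)
  else if tk = none then (stack, answer + (stack.length : Int))
  else (stack.tail, answer + 1)

def solution_alt (arrangement : String) : Int :=
  ((solutionAltTok arrangement.toList).foldl solutionAltStep ([], 0)).2

-- ===== PRECONDITION & SPEC =====
-- Pre_ excludes exactly the inputs on which A raises IndexError (stack.pop on an empty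
-- stack): those where some prefix contains more non-opening characters (A pops on every
-- one of them) than opening brackets.
def Pre_solution (arrangement : String) : Prop :=
  ∀ i < arrangement.toList.length + 1,
    ((arrangement.toList.take i).countP (fun c => !(c == '('))) ≤
      (arrangement.toList.take i).count '('

instance (arrangement : String) : Decidable (Pre_solution arrangement) := by
  unfold Pre_solution; infer_instance

def pvWitness_solution : String := "(((x))"

def Spec_solution (arrangement : String) (out : Int) : Prop := out = solution_alt arrangement
instance (arrangement : String) (out : Int) : Decidable (Spec_solution arrangement out) := by unfold Spec_solution; infer_instance

-- ===== CLAIM (what is proved, stated in full; the proofs are below) =====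
def Claim_equal_solution : Prop := ∀ (arrangement : String), Dom_solution arrangement → Pre_solution arrangement → Spec_solution arrangement (solution arrangement)

-- ===== LEMMAS AND PROOFS =====

-- unfolding equation for the tokenizer's catch-all arm
theorem solutionAltTok_cons (c : Char) (t : List Char) (h : c ≠ '(' ∨ t = []) :
    solutionAltTok (c :: t) = some c :: solutionAltTok t := by
  rw [solutionAltTok.eq_def]
  split
  · next c' t' h2 =>
    injection h2 with h2a h2b
    subst h2a
    rcases h with h | h
    · exact absurd rfl h
    · rw [h] at h2b; cases h2b
  · next c' t' h2 h3 =>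
    injection h3 with h3a h3b
    rw [h3a, h3b]
  · next h2 => exact absurd h2 (by simp)

-- the core invariant: B's counting pass over the token list of s, run from the same stack,
-- computes the same answer as A's pass over s, for any temp that is not "(" when s starts
-- with a non-opening character
theorem key : ∀ (s : List Char) (a : Int) (stack : List Char) (temp : String),
    (∀ i, ((s.take i).countP (fun c => !(c == '('))) ≤ stack.length + (s.take i).count '(') →
    (∀ c, s.head? = some c → c ≠ '(' → temp ≠ "(") →
    ((solutionAltTok s).foldl solutionAltStep (stack, a)).2 =
      (s.foldl solutionStep (a, stack, temp)).1 := by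
  intro s
  induction s using solutionAltTok.induct with
  | case1 c t hc ih =>
    -- s = '(' :: c :: t with c ≠ '(' : a laser
    intro a stack temp hbal _
    rw [show solutionAltTok ('(' :: c :: t) = none :: solutionAltTok t by
      rw [solutionAltTok.eq_def]; simp [hc]]
    simp only [List.foldl_cons]
    have hA : solutionStep (solutionStep (a, stack, temp) '(') c =
        (a + (stack.length : Int), stack, ")") := by
      simp [solutionStep, hc]
    have hB : solutionAltStep (stack, a) none = (stack, a + (stack.length : Int)) := by
      simp [solutionAltStep]
    rw [hA, hB]
    apply ih
    · intro i
      have := hbal (i + 2)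
      simp [hc] at this ⊢
      omega
    · intro c' _ _; simp
  | case2 c t hc ih =>
    -- s = '(' :: c :: t with c = '(' : push, and the tail still starts with '('
    intro a stack temp hbal _
    have hc' : c = '(' := by simpa using hc
    subst hc'
    rw [show solutionAltTok ('(' :: '(' :: t) = some '(' :: solutionAltTok ('(' :: t) by
      rw [solutionAltTok.eq_def]; simp]
    simp only [List.foldl_cons]
    have hA : solutionStep (a, stack, temp) '(' = (a, '(' :: stack, "(") := by
      simp [solutionStep]
    have hB : solutionAltStep (stack, a) (some '(') = ('(' :: stack, a) := by
      simp [solutionAltStep]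
    rw [hA, hB]
    apply ih
    · intro i
      have := hbal (i + 1)
      simp at this ⊢
      omega
    · intro c' hc1 hc2
      simp at hc1
      exact absurd hc1.symm hc2
  | case3 c t hne ih =>
    -- s = c :: t not starting with the pattern '(' followed by another character
    intro a stack temp hbal hhead
    by_cases hc : c = '('
    · -- then t = [] : a trailing '(' — push and stop
      subst hc
      have ht : t = [] := by
        cases t with
        | nil => rfl
        | cons a2 t2 => exact (hne a2 t2 rfl rfl).elim
      subst ht
      simp [solutionAltTok, solutionAltStep, solutionStep]
    · -- c is a bar end; the stack is nonempty by the balance condition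
      have hstk : stack ≠ [] := by
        have := hbal 1
        simp [hc] at this
        intro h; subst h; simp at this
      rw [solutionAltTok_cons c t (Or.inl hc)]
      simp only [List.foldl_cons]
      have htemp := hhead c rfl hc
      have hA : solutionStep (a, stack, temp) c = (a + 1, stack.tail, ")") := by
        simp [solutionStep, hc, htemp]
      have hB : solutionAltStep (stack, a) (some c) = (stack.tail, a + 1) := by
        simp [solutionAltStep, hc]
      rw [hA, hB]
      apply ih
      · intro i
        have h1 := hbal (i + 1)
        have hlen : stack.tail.length = stack.length - 1 := by
          simp [List.length_tail]
        have hpos : 1 ≤ stack.length := by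
          cases stack with
          | nil => exact absurd rfl hstk
          | cons _ _ => simp
        simp [hc] at h1 ⊢
        omega
      · intro c' _ _; simp
  | case4 =>
    intro a stack temp _ _
    simp [solutionAltTok]

-- ===== VERDICT (by name: the statement is the Claim_ definition above) =====
theorem solution_spec : Claim_equal_solution := by
  intro arrangement _ hbal
  show solution arrangement = solution_alt arrangement
  simp only [solution, solution_alt]
  refine (key arrangement.toList 0 [] "" ?_ ?_).symm
  · intro i
    by_cases hi : i ≤ arrangement.toList.length
    · simpa using hbal i (by omega)
    · have heq : arrangement.toList.take i = arrangement.toList := by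
        apply List.take_of_length_le; omega
      rw [heq]
      have := hbal arrangement.toList.length (by omega)
      rw [List.take_length] at this
      simpa using this
  · intro c _ _
    simp
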